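-- pv_equiv track=rewrite | github.com/IgnacioFucksmann/MCP_NestJS | frontend/app.py | detectar_accion
-- ===== SOURCE A (Python) =====
-- def detectar_accion(texto):
--     texto = texto.lower()
--     if any(pal in texto for pal in ["eliminar", "borrar", "quitar"]):
--         return "eliminar"
--     elif any(pal in texto for pal in ["modificar", "cambiar", "actualizar"]):
--         return "modificar"
--     elif any(
--         pal in texto
--         for pal in ["consultar", "mostrar", "buscar", "ver", "listar", "obtener"]
--     ):
--         if "id" in texto or "usuario" in texto and not "usuarios" in texto:
--             return "consultar_uno"
--         return "consultar_todos"
--     elif any(pal in texto for pal in ["agregar", "alta", "insertar", "registrar"]):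
--         return "agregar"
--     else:
--         return None
-- ===== SOURCE B (Python) =====
-- # Different algorithm: one left-to-right scan over the positions of the
-- # lowercased text collects, position by position, the set of keywords that
-- # occur anywhere (a hand-rolled multi-pattern matcher); the action is then
-- # chosen from that hit set.  A instead runs a separate substring scan per
-- # keyword in priority order.  Correct because only WHICH keywords occur
-- # matters, never where or in which order they are found.
-- _PATTERNS = ("eliminar", "borrar", "quitar",
--              "modificar", "cambiar", "actualizar",
--              "consultar", "mostrar", "buscar", "ver", "listar", "obtener",
--              "agregar", "alta", "insertar", "registrar",
--              "id", "usuario", "usuarios")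
--
--
-- def detectar_accion(texto):
--     t = texto.lower()
--     hits = set()
--     for i in range(len(t)):
--         for p in _PATTERNS:
--             if t.startswith(p, i):
--                 hits.add(p)
--     if hits & {"eliminar", "borrar", "quitar"}:
--         return "eliminar"
--     if hits & {"modificar", "cambiar", "actualizar"}:
--         return "modificar"
--     if hits & {"consultar", "mostrar", "buscar", "ver", "listar", "obtener"}:
--         if "id" in hits or ("usuario" in hits and "usuarios" not in hits):
--             return "consultar_uno"
--         return "consultar_todos"
--     if hits & {"agregar", "alta", "insertar", "registrar"}:
--         return "agregar"
--     return None
-- ===== Notes on version B (the rewrite author's own statement) =====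
-- stated objective: alternative
-- what changed: B replaces A's per-keyword priority-ordered substring scans by a single left-to-right scan over the text's positions that accumulates the set of all occurring keywords (a hand-rolled multi-pattern matcher), and then chooses the action from that hit set.
import Mathlib
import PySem

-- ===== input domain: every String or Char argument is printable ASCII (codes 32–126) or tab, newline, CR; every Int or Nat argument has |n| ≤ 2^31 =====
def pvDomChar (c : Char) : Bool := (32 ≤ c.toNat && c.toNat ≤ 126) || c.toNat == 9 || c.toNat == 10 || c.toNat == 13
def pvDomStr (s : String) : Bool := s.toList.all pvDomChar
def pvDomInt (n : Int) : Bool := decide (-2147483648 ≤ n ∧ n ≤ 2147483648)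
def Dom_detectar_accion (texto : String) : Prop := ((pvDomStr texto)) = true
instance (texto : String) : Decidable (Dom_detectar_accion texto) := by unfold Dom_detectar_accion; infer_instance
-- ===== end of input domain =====

-- B scans the text once, position by position, collecting the set of all
-- occurring keywords, then picks the action from that hit set (objective:
-- alternative algorithm). Return values identical.

-- ===== PORT A =====
def detectar_accion (texto : String) : Option String :=
  let t := PySem.Str.lower texto
  if ["eliminar", "borrar", "quitar"].any (fun pal => PySem.Str.isIn pal t) then
    some "eliminar"
  else if ["modificar", "cambiar", "actualizar"].any (fun pal => PySem.Str.isIn pal t) then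
    some "modificar"
  else if ["consultar", "mostrar", "buscar", "ver", "listar", "obtener"].any
      (fun pal => PySem.Str.isIn pal t) then
    if PySem.Str.isIn "id" t ||
        (PySem.Str.isIn "usuario" t && !PySem.Str.isIn "usuarios" t) then
      some "consultar_uno"
    else
      some "consultar_todos"
  else if ["agregar", "alta", "insertar", "registrar"].any (fun pal => PySem.Str.isIn pal t) then
    some "agregar"
  else
    none

-- ===== PORT B =====
def pvPatterns : List String :=
  ["eliminar", "borrar", "quitar",
   "modificar", "cambiar", "actualizar",
   "consultar", "mostrar", "buscar", "ver", "listar", "obtener",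
   "agregar", "alta", "insertar", "registrar",
   "id", "usuario", "usuarios"]

-- the position loop 'for i in range(len(t)): for p in _PATTERNS: if t.startswith(p, i): hits.add(p)'
-- (t.startswith(p, i) is exactly: p is a prefix of the suffix of t starting at i)
def pvScan : List Char → PySem.Set String → PySem.Set String
  | [], hits => hits
  | c :: rest, hits =>
      pvScan rest
        (pvPatterns.foldl
          (fun h p => if PySem.Chars.startswith (c :: rest) p.toList then PySem.Set.add h p else h)
          hits)

def detectar_accion_alt (texto : String) : Option String :=
  let hits := pvScan (PySem.Str.lower texto).toList PySem.Set.empty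
  if !(PySem.Set.inter hits ["eliminar", "borrar", "quitar"]).isEmpty then
    some "eliminar"
  else if !(PySem.Set.inter hits ["modificar", "cambiar", "actualizar"]).isEmpty then
    some "modificar"
  else if !(PySem.Set.inter hits ["consultar", "mostrar", "buscar", "ver", "listar", "obtener"]).isEmpty then
    if PySem.Set.contains hits "id" ||
        (PySem.Set.contains hits "usuario" && !PySem.Set.contains hits "usuarios") then
      some "consultar_uno"
    else
      some "consultar_todos"
  else if !(PySem.Set.inter hits ["agregar", "alta", "insertar", "registrar"]).isEmpty then
    some "agregar"
  else
    none

-- ===== PRECONDITION & SPEC =====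
def Spec_detectar_accion (texto : String) (out : Option String) : Prop := out = detectar_accion_alt texto
instance (texto : String) (out : Option String) : Decidable (Spec_detectar_accion texto out) := by unfold Spec_detectar_accion; infer_instance

-- ===== CLAIM (what is proved, stated in full; the proofs are below) =====
def Claim_equal_detectar_accion : Prop := ∀ (texto : String), Dom_detectar_accion texto → Spec_detectar_accion texto (detectar_accion texto)

-- ===== LEMMAS AND PROOFS =====

-- membership after one position's pattern pass
theorem mem_foldl_addif (p : String) (l : List String) (hits : PySem.Set String)
    (cond : String → Bool) :
    p ∈ l.foldl (fun h q => if cond q then PySem.Set.add h q else h) hits ↔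
      p ∈ hits ∨ (p ∈ l ∧ cond p = true) := by
  induction l generalizing hits with
  | nil => simp
  | cons q rest ih =>
      simp only [List.foldl_cons, ih]
      by_cases hq : cond q = true
      · simp only [hq, if_pos]
        rw [PySem.Set.mem_add]
        constructor
        · rintro ((h | h) | h)
          · exact Or.inl h
          · subst h; exact Or.inr ⟨List.mem_cons_self, hq⟩
          · exact Or.inr ⟨List.mem_cons_of_mem _ h.1, h.2⟩
        · rintro (h | ⟨hm, hc⟩)
          · exact Or.inl (Or.inl h)
          · rcases List.mem_cons.mp hm with h | h
            · subst h; exact Or.inl (Or.inr rfl)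
            · exact Or.inr ⟨h, hc⟩
      · simp only [hq, if_neg, Bool.false_eq_true, not_false_iff]
        constructor
        · rintro (h | ⟨hm, hc⟩)
          · exact Or.inl h
          · exact Or.inr ⟨List.mem_cons_of_mem _ hm, hc⟩
        · rintro (h | ⟨hm, hc⟩)
          · exact Or.inl h
          · rcases List.mem_cons.mp hm with h | h
            · subst h; exact absurd hc hq
            · exact Or.inr ⟨h, hc⟩

theorem isIn_cons (sub : List Char) (c : Char) (rest : List Char) :
    PySem.Chars.isIn sub (c :: rest) =
      (PySem.Chars.startswith (c :: rest) sub || PySem.Chars.isIn sub rest) := by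
  rw [Bool.eq_iff_iff]
  rw [← PySem.Chars.exists_prefix_drop_iff_isIn]
  rw [Bool.or_eq_true, PySem.Chars.startswith_iff, ← PySem.Chars.exists_prefix_drop_iff_isIn]
  constructor
  · rintro ⟨j, hj⟩
    cases j with
    | zero => exact Or.inl hj
    | succ n => exact Or.inr ⟨n, by simpa using hj⟩
  · rintro (h | ⟨n, hn⟩)
    · exact ⟨0, h⟩
    · exact ⟨n + 1, by simpa using hn⟩

theorem mem_pvScan (p : String) (hp : p ∈ pvPatterns) (l : List Char) (hits : PySem.Set String) :
    p ∈ pvScan l hits ↔ p ∈ hits ∨ PySem.Chars.isIn p.toList l = true := by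
  induction l generalizing hits with
  | nil =>
      have hne : p.toList ≠ [] := by
        fin_cases hp <;> decide
      simp only [pvScan]
      constructor
      · exact Or.inl
      · rintro (h | h)
        · exact h
        · exfalso
          rw [← PySem.Chars.exists_prefix_drop_iff_isIn] at h
          rcases h with ⟨j, hj⟩
          simp only [List.drop_nil] at hj
          exact hne (List.prefix_nil.mp hj)
  | cons c rest ih =>
      simp only [pvScan, ih, mem_foldl_addif, isIn_cons]
      constructor
      · rintro ((h | ⟨_, hc⟩) | h)
        · exact Or.inl h
        · exact Or.inr (by simp [hc])
        · exact Or.inr (by simp [h])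
      · rintro (h | h)
        · exact Or.inl (Or.inl h)
        · rw [Bool.or_eq_true] at h
          rcases h with h | h
          · exact Or.inl (Or.inr ⟨hp, h⟩)
          · exact Or.inr h

theorem contains_pvScan (p : String) (hp : p ∈ pvPatterns) (l : List Char) :
    PySem.Set.contains (pvScan l PySem.Set.empty) p = PySem.Chars.isIn p.toList l := by
  rw [Bool.eq_iff_iff, PySem.Set.contains_iff, mem_pvScan p hp]
  simp [PySem.Set.empty]

theorem inter_pvScan (g : List String) (hg : ∀ p ∈ g, p ∈ pvPatterns) (l : List Char) :
    (!(PySem.Set.inter (pvScan l PySem.Set.empty) g).isEmpty) =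
      g.any (fun p => PySem.Chars.isIn p.toList l) := by
  rw [Bool.eq_iff_iff, Bool.not_eq_true', List.isEmpty_eq_false_iff_exists_mem, List.any_eq_true]
  constructor
  · rintro ⟨y, hy⟩
    rw [PySem.Set.mem_inter] at hy
    refine ⟨y, hy.2, ?_⟩
    have := (mem_pvScan y (hg y hy.2) l PySem.Set.empty).mp hy.1
    simpa [PySem.Set.empty] using this
  · rintro ⟨y, hyg, hy⟩
    exact ⟨y, (PySem.Set.mem_inter _ _ _).mpr
      ⟨(mem_pvScan y (hg y hyg) l PySem.Set.empty).mpr (Or.inr hy), hyg⟩⟩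

theorem detectar_accion_eq_alt (texto : String) :
    detectar_accion texto = detectar_accion_alt texto := by
  unfold detectar_accion detectar_accion_alt
  have h1 := inter_pvScan ["eliminar", "borrar", "quitar"] (by decide) (PySem.Str.lower texto).toList
  have h2 := inter_pvScan ["modificar", "cambiar", "actualizar"] (by decide) (PySem.Str.lower texto).toList
  have h3 := inter_pvScan ["consultar", "mostrar", "buscar", "ver", "listar", "obtener"] (by decide) (PySem.Str.lower texto).toList
  have h4 := inter_pvScan ["agregar", "alta", "insertar", "registrar"] (by decide) (PySem.Str.lower texto).toList
  have h5 := contains_pvScan "id" (by decide) (PySem.Str.lower texto).toList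
  have h6 := contains_pvScan "usuario" (by decide) (PySem.Str.lower texto).toList
  have h7 := contains_pvScan "usuarios" (by decide) (PySem.Str.lower texto).toList
  simp only [h1, h2, h3, h4, h5, h6, h7, PySem.Str.isIn_eq]
  rfl

-- ===== VERDICT (by name: the statement is the Claim_ definition above) =====
theorem detectar_accion_spec : Claim_equal_detectar_accion := by
  intro texto _
  unfold Spec_detectar_accion
  exact detectar_accion_eq_alt texto
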